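-- pv_equiv track=rewrite | github.com/Manan-J98/Algorithms | 2220-find-all-possible-recipes-from-given-supplies/find-all-possible-recipes-from-given-supplies.py | findAllRecipes
-- ===== SOURCE A (Python) =====
-- from typing import List
--
-- def findAllRecipes(recipes: List[str], ingredients: List[List[str]], supplies: List[str]) -> List[str]:
--     supply_set = set(supplies)
--     recipe_map = {recipes[i]: ingredients[i] for i in range(len(recipes))}
--     memo = {}
--
--     def dfs(recipe):
--         if recipe in memo:
--             return memo[recipe]
--         if recipe not in recipe_map:
--             return False
--         memo[recipe] = False
--         for ing in recipe_map[recipe]: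
--             if ing not in supply_set and not dfs(ing):
--                 return False
--         supply_set.add(recipe)
--         memo[recipe] = True
--         return True
--
--     return [recipe for recipe in recipes if dfs(recipe)]
-- ===== SOURCE B (Python) =====
-- from typing import List
--
-- def findAllRecipes(recipes: List[str], ingredients: List[List[str]], supplies: List[str]) -> List[str]:
--     recipe_map = dict(zip(recipes, ingredients))
--     have = set(supplies)
--     made = set()
--     for _ in range(len(recipes)):
--         changed = False
--         for r, ings in recipe_map.items():
--             if r not in made and all(i in have for i in ings):
--                 made.add(r)
--                 have.add(r)
--                 changed = True
--         if not changed: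
--             break
--     return [r for r in recipes if r in made]
-- ===== Notes on version B (the rewrite author's own statement) =====
-- stated objective: alternative
-- what changed: Replaces A's recursive memoized DFS (with cycle-breaking memo[False]) by an iterative round-based saturation: repeatedly sweep the recipe map, marking a recipe made once all its ingredients are supplied or already made, stopping when a sweep changes nothing, then filter the input list by the made-set.
import Mathlib
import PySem

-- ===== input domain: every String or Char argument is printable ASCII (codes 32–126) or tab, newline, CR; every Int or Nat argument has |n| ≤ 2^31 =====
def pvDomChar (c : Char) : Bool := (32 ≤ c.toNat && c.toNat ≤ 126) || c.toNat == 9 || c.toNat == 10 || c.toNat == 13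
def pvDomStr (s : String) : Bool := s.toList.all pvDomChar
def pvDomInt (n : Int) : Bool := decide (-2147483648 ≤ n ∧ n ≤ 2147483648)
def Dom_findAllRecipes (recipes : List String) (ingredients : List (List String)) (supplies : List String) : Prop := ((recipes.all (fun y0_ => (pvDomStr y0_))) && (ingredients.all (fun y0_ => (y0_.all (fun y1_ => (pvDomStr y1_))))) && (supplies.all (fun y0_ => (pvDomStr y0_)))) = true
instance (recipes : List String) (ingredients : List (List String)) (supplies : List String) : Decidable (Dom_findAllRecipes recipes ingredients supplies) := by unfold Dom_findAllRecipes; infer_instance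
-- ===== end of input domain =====

-- ===== PORT A =====
-- B re-implements A's memoized DFS as an iterative fixed-point saturation (no recursion, no memo);
-- objective: alternative algorithm, same return value. Pre_ excludes inputs where A raises IndexError.

-- recipe_map = {recipes[i]: ingredients[i] for i in range(len(recipes))}
-- (pyGet? ingredients i is none exactly where Python raises IndexError; Pre_ excludes that, so .getD [] is the total form)
def buildA (recipes : List String) (ingredients : List (List String)) : PySem.Dict String (List String) :=
  (PySem.List.pyRange 0 (PySem.List.len recipes) 1).foldl
      (fun d i => d.insert (PySem.List.pyGetD recipes i "") ((PySem.List.pyGet? ingredients i).getD []))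
      PySem.Dict.empty

-- A's dfs, threading (memo, supply_set); fuel is only a totality guard (each nested call memoizes a
-- new key first, so the recursion depth is bounded); it is called with fuel = len(recipes)+1, which
-- the equivalence proof shows is never exhausted.
mutual
def dfsA (rm : PySem.Dict String (List String)) : Nat → String → PySem.Dict String Bool → PySem.Set String → Bool × PySem.Dict String Bool × PySem.Set String
  | 0, _, memo, sup => (false, memo, sup)
  | fuel+1, r, memo, sup =>
    match memo.get? r with
    | some b => (b, memo, sup)
    | none =>
      match rm.get? r with
      | none => (false, memo, sup)
      | some l => goA rm fuel r l (memo.insert r false) sup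
termination_by fuel _ _ _ => (fuel, 0)

-- the "for ing in recipe_map[recipe]" loop of dfs; [] = loop done: supply_set.add, memo[recipe]=True
def goA (rm : PySem.Dict String (List String)) : Nat → String → List String → PySem.Dict String Bool → PySem.Set String → Bool × PySem.Dict String Bool × PySem.Set String
  | _, r, [], memo, sup => (true, memo.insert r true, sup.add r)
  | fuel, r, i :: rest, memo, sup =>
    if PySem.Set.contains sup i then goA rm fuel r rest memo sup
    else
      match dfsA rm fuel i memo sup with
      | (true, memo', sup') => goA rm fuel r rest memo' sup'
      | (_, memo', sup') => (false, memo', sup')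
termination_by fuel _ l _ _ => (fuel, l.length + 1)
end

def findAllRecipes (recipes : List String) (ingredients : List (List String)) (supplies : List String) : List String :=
  -- [recipe for recipe in recipes if dfs(recipe)], threading memo and supply_set left to right
  (recipes.foldl
      (fun (st : List String × PySem.Dict String Bool × PySem.Set String) r =>
        match dfsA (buildA recipes ingredients) (recipes.length + 1) r st.2.1 st.2.2 with
        | (b, memo, sup) => (if b then st.1 ++ [r] else st.1, memo, sup))
      ([], PySem.Dict.empty, PySem.Set.ofList supplies)).1

-- ===== PORT B =====
-- one pass of Source B's inner "for r, ings in recipe_map.items()" loop; state = (made, have, changed)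
def passB (rm : PySem.Dict String (List String)) (st : PySem.Set String × PySem.Set String × Bool) : PySem.Set String × PySem.Set String × Bool :=
  rm.items.foldl
    (fun st p =>
      if !(PySem.Set.contains st.1 p.1) && p.2.all (fun i => PySem.Set.contains st.2.1 i) then
        (PySem.Set.add st.1 p.1, PySem.Set.add st.2.1 p.1, true)
      else st)
    st

-- "for _ in range(len(recipes)): changed = False; <pass>; if not changed: break"
def loopB (rm : PySem.Dict String (List String)) : Nat → PySem.Set String × PySem.Set String → PySem.Set String × PySem.Set String
  | 0, s => s
  | fuel+1, s =>
    match passB rm (s.1, s.2, false) with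
    | (made', hav', true) => loopB rm fuel (made', hav')
    | (made', hav', false) => (made', hav')

def findAllRecipes_alt (recipes : List String) (ingredients : List (List String)) (supplies : List String) : List String :=
  -- recipe_map = dict(zip(recipes, ingredients)); made = set(); have = set(supplies)
  (recipes.filter (fun r => PySem.Set.contains
    (loopB (PySem.Dict.ofList (recipes.zip ingredients)) recipes.length
      (PySem.Set.empty, PySem.Set.ofList supplies)).1 r))

-- ===== PRECONDITION & SPEC =====
-- Pre_ excludes exactly the inputs with fewer ingredient lists than recipes, on which A raises
-- IndexError at ingredients[i]; A returns normally on every other input.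
def Pre_findAllRecipes (recipes : List String) (ingredients : List (List String)) (supplies : List String) : Prop :=
  recipes.length ≤ ingredients.length
instance (recipes : List String) (ingredients : List (List String)) (supplies : List String) : Decidable (Pre_findAllRecipes recipes ingredients supplies) := by unfold Pre_findAllRecipes; infer_instance

def pvWitness_findAllRecipes : List String × List (List String) × List String :=
  (["bread", "cake"], [["flour"], ["bread", "sugar"]], ["flour", "sugar"])

def Spec_findAllRecipes (recipes : List String) (ingredients : List (List String)) (supplies : List String) (out : List String) : Prop := out = findAllRecipes_alt recipes ingredients supplies
instance (recipes : List String) (ingredients : List (List String)) (supplies : List String) (out : List String) : Decidable (Spec_findAllRecipes recipes ingredients supplies out) := by unfold Spec_findAllRecipes; infer_instance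

-- ===== CLAIM (what is proved, stated in full; the proofs are below) =====
def Claim_equal_findAllRecipes : Prop := ∀ (recipes : List String) (ingredients : List (List String)) (supplies : List String), Dom_findAllRecipes recipes ingredients supplies → Pre_findAllRecipes recipes ingredients supplies → Spec_findAllRecipes recipes ingredients supplies (findAllRecipes recipes ingredients supplies)

-- ===== LEMMAS AND PROOFS =====


def MkAt (g : String → Option (List String)) (S : List String) : Nat → String → Prop
  | 0, _ => False
  | k+1, r => ∃ l, g r = some l ∧ ∀ i ∈ l, i ∈ S ∨ MkAt g S k i

def Mk (g : String → Option (List String)) (S : List String) (r : String) : Prop := ∃ k, MkAt g S k r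

theorem MkAt_mono (g : String → Option (List String)) (S : List String) :
    ∀ {k k' : Nat}, k ≤ k' → ∀ {r}, MkAt g S k r → MkAt g S k' r := by
  intro k
  induction k with
  | zero => intro k' _ r h; simp [MkAt] at h
  | succ k ih =>
    intro k' hle r h
    match k', hle with
    | k'' + 1, hle =>
      obtain ⟨l, hg, hall⟩ := h
      exact ⟨l, hg, fun i hi => (hall i hi).imp id (ih (by omega))⟩

theorem Mk_rule (g : String → Option (List String)) (S : List String) {r : String} {l : List String}
    (hg : g r = some l) (h : ∀ i ∈ l, i ∈ S ∨ Mk g S i) : Mk g S r := by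
  have aux : ∀ (l' : List String), (∀ i ∈ l', i ∈ S ∨ Mk g S i) → ∃ k, ∀ i ∈ l', i ∈ S ∨ MkAt g S k i := by
    intro l'
    induction l' with
    | nil => exact fun _ => ⟨0, by simp⟩
    | cons a as ih =>
      intro h
      obtain ⟨k1, hk1⟩ := ih (fun i hi => h i (List.mem_cons_of_mem _ hi))
      rcases h a (List.mem_cons_self) with hS | ⟨k2, hk2⟩
      · exact ⟨k1, by
          intro i hi
          rcases List.mem_cons.mp hi with rfl | hi
          · exact Or.inl hS
          · exact hk1 i hi⟩
      · exact ⟨max k1 k2, by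
          intro i hi
          rcases List.mem_cons.mp hi with rfl | hi
          · exact Or.inr (MkAt_mono g S (Nat.le_max_right _ _) hk2)
          · exact (hk1 i hi).imp id (MkAt_mono g S (Nat.le_max_left _ _))⟩
  obtain ⟨k, hk⟩ := aux l h
  exact ⟨k + 1, l, hg, hk⟩

theorem Mk_no_self (g : String → Option (List String)) (S : List String) {x : String}
    (h : ∀ k, MkAt g S k x → ∃ j, j < k ∧ MkAt g S j x) : ¬ Mk g S x := by
  have hall : ∀ k, ¬ MkAt g S k x := by
    intro k
    induction k using Nat.strong_induction_on with
    | _ k ih =>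
      intro hk
      obtain ⟨j, hj, hjx⟩ := h k hk
      exact ih j hj hjx
  rintro ⟨k, hk⟩
  exact hall k hk

theorem mem_keys_of_get?_some {ν : Type} (d : PySem.Dict String ν) {k : String} {v : ν}
    (h : d.get? k = some v) : k ∈ d.keys :=
  PySem.Dict.mem_keys_of_mem_items d (PySem.Dict.mem_items_of_get?_eq_some d h)

def pvMissing (rm : PySem.Dict String (List String)) (memo : PySem.Dict String Bool) : Nat :=
  (rm.keys.filter (fun k => (memo.get? k).isNone)).length

theorem filter_none_insert (memo : PySem.Dict String Bool) (r : String) (v : Bool) :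
    ∀ (l : List String), l.Nodup → r ∈ l → memo.get? r = none →
    (l.filter (fun k => (((memo.insert r v).get? k)).isNone)).length + 1
      = (l.filter (fun k => ((memo.get? k)).isNone)).length := by
  intro l
  induction l with
  | nil => intro _ hr; cases hr
  | cons a as ih =>
    intro hnd hr hm
    rcases List.mem_cons.mp hr with rfl | hr
    · have htail : as.filter (fun k => (((memo.insert r v).get? k)).isNone)
          = as.filter (fun k => ((memo.get? k)).isNone) := by
        apply List.filter_congr
        intro x hx
        have hxa : x ≠ r := fun h => (List.nodup_cons.mp hnd).1 (h ▸ hx)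
        rw [PySem.Dict.get?_insert_of_ne _ _ hxa]
      rw [List.filter_cons, List.filter_cons, PySem.Dict.get?_insert_self, hm]
      simp [htail]
    · have hna : a ≠ r := fun h => (List.nodup_cons.mp hnd).1 (h ▸ hr)
      have hhead : ((memo.insert r v).get? a) = memo.get? a := PySem.Dict.get?_insert_of_ne _ _ hna
      have hih := ih (List.nodup_cons.mp hnd).2 hr hm
      rw [List.filter_cons, List.filter_cons, hhead]
      by_cases hp : (memo.get? a).isNone = true
      · simp [hp]; omega
      · simp [hp]; omega

theorem pvMissing_insert (rm : PySem.Dict String (List String)) (memo : PySem.Dict String Bool)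
    (r : String) (v : Bool) (hnd : rm.keys.Nodup) (hr : r ∈ rm.keys) (hm : memo.get? r = none) :
    pvMissing rm (memo.insert r v) + 1 = pvMissing rm memo :=
  filter_none_insert memo r v rm.keys hnd hr hm

theorem pvMissing_mono (rm : PySem.Dict String (List String)) {m m' : PySem.Dict String Bool}
    (h : ∀ x, m'.get? x = none → m.get? x = none) : pvMissing rm m' ≤ pvMissing rm m := by
  unfold pvMissing
  rw [← List.countP_eq_length_filter, ← List.countP_eq_length_filter]
  exact List.countP_mono_left (fun x _ hx => by
    simp only [Option.isNone_iff_eq_none] at hx ⊢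
    exact h x hx)

theorem pvMissing_le (rm : PySem.Dict String (List String)) (memo : PySem.Dict String Bool) :
    pvMissing rm memo ≤ rm.keys.length :=
  List.length_filter_le _ _

theorem nodup_subset_rev (a b : List String) (ha : a.Nodup) (hb : b.Nodup) (hs : a ⊆ b)
    (hl : b.length ≤ a.length) : b ⊆ a := by
  intro x hx
  have h1 : a.toFinset ⊆ b.toFinset := by
    intro y hy
    simp only [List.mem_toFinset] at hy ⊢
    exact hs hy
  have hca : a.toFinset.card = a.length := List.toFinset_card_of_nodup ha
  have hcb : b.toFinset.card = b.length := List.toFinset_card_of_nodup hb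
  have : a.toFinset = b.toFinset := Finset.eq_of_subset_of_card_le h1 (by omega)
  have := this ▸ (List.mem_toFinset.mpr hx)
  exact List.mem_toFinset.mp this

theorem zip_pairs (recipes : List String) :
    ∀ (ingredients : List (List String)), recipes.length ≤ ingredients.length →
    (List.range recipes.length).map (fun i => (recipes.getD i "", (ingredients[i]?).getD []))
      = recipes.zip ingredients := by
  induction recipes with
  | nil => intro _ _; simp
  | cons a as ih =>
    intro ingredients h
    match ingredients with
    | [] => simp at h
    | b :: bs =>
      simp only [List.length_cons, List.range_succ_eq_map, List.map_cons, List.map_map,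
        Function.comp_def, List.getD_cons_zero, List.getElem?_cons_zero, Option.getD_some,
        List.getD_cons_succ, List.getElem?_cons_succ, List.zip_cons_cons]
      rw [ih bs (by simpa using h)]


theorem buildA_eq (recipes : List String) (ingredients : List (List String))
    (h : recipes.length ≤ ingredients.length) :
    buildA recipes ingredients = PySem.Dict.ofList (recipes.zip ingredients) := by
  unfold buildA
  rw [PySem.List.len_eq, PySem.List.pyRange_zero_natCast, List.foldl_map]
  simp only [PySem.List.pyGetD_natCast, PySem.List.pyGet?_natCast]
  show _ = (recipes.zip ingredients).foldl (fun acc p => acc.insert p.1 p.2) PySem.Dict.empty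
  rw [← zip_pairs recipes ingredients h, List.foldl_map]

def BInv (rm : PySem.Dict String (List String)) (S : List String) (made hav : PySem.Set String) : Prop :=
  made.Nodup ∧ (∀ x ∈ made, Mk rm.get? S x) ∧ (∀ x ∈ made, x ∈ rm.keys) ∧
    (∀ x, x ∈ hav ↔ x ∈ S ∨ x ∈ made)

theorem passFold_ok (rm : PySem.Dict String (List String)) (S : List String) :
    ∀ (ps : List (String × List String)) (made hav : PySem.Set String) (c : Bool),
    (∀ p ∈ ps, rm.get? p.1 = some p.2) → BInv rm S made hav →
    (BInv rm S (ps.foldl (fun st p =>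
        if !(PySem.Set.contains st.1 p.1) && p.2.all (fun i => PySem.Set.contains st.2.1 i) then
          (PySem.Set.add st.1 p.1, PySem.Set.add st.2.1 p.1, true)
        else st) (made, hav, c)).1
      (ps.foldl (fun st p =>
        if !(PySem.Set.contains st.1 p.1) && p.2.all (fun i => PySem.Set.contains st.2.1 i) then
          (PySem.Set.add st.1 p.1, PySem.Set.add st.2.1 p.1, true)
        else st) (made, hav, c)).2.1)
    ∧ made.length ≤ ((ps.foldl (fun st p =>
        if !(PySem.Set.contains st.1 p.1) && p.2.all (fun i => PySem.Set.contains st.2.1 i) then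
          (PySem.Set.add st.1 p.1, PySem.Set.add st.2.1 p.1, true)
        else st) (made, hav, c)).1).length
    ∧ (c = true → (ps.foldl (fun st p =>
        if !(PySem.Set.contains st.1 p.1) && p.2.all (fun i => PySem.Set.contains st.2.1 i) then
          (PySem.Set.add st.1 p.1, PySem.Set.add st.2.1 p.1, true)
        else st) (made, hav, c)).2.2 = true)
    ∧ ((ps.foldl (fun st p =>
        if !(PySem.Set.contains st.1 p.1) && p.2.all (fun i => PySem.Set.contains st.2.1 i) then
          (PySem.Set.add st.1 p.1, PySem.Set.add st.2.1 p.1, true)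
        else st) (made, hav, c)).2.2 = false →
        (ps.foldl (fun st p =>
        if !(PySem.Set.contains st.1 p.1) && p.2.all (fun i => PySem.Set.contains st.2.1 i) then
          (PySem.Set.add st.1 p.1, PySem.Set.add st.2.1 p.1, true)
        else st) (made, hav, c)) = (made, hav, c)
        ∧ ∀ p ∈ ps, p.1 ∈ made ∨ ∃ i ∈ p.2, i ∉ hav)
    ∧ (c = false → (ps.foldl (fun st p =>
        if !(PySem.Set.contains st.1 p.1) && p.2.all (fun i => PySem.Set.contains st.2.1 i) then
          (PySem.Set.add st.1 p.1, PySem.Set.add st.2.1 p.1, true)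
        else st) (made, hav, c)).2.2 = true →
        made.length < ((ps.foldl (fun st p =>
        if !(PySem.Set.contains st.1 p.1) && p.2.all (fun i => PySem.Set.contains st.2.1 i) then
          (PySem.Set.add st.1 p.1, PySem.Set.add st.2.1 p.1, true)
        else st) (made, hav, c)).1).length) := by
  intro ps
  induction ps with
  | nil =>
    intro made hav c _ hInv
    refine ⟨hInv, le_refl _, fun h => h, fun h => ⟨rfl, by simp⟩, fun h1 h2 => by simp [h1] at h2⟩
  | cons p ps ih =>
    intro made hav c hp hInv
    simp only [List.foldl_cons]
    by_cases hfire : (!(PySem.Set.contains made p.1) && p.2.all (fun i => PySem.Set.contains hav i)) = true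
    · rw [if_pos hfire]
      have hnm : p.1 ∉ made := by
        have := (Bool.and_eq_true _ _).mp hfire |>.1
        simp only [Bool.not_eq_true'] at this
        intro hmem
        rw [(PySem.Set.contains_iff made p.1).mpr hmem] at this
        cases this
      have hall : ∀ i ∈ p.2, i ∈ S ∨ i ∈ made := by
        intro i hi
        have := (Bool.and_eq_true _ _).mp hfire |>.2
        have hc := (List.all_eq_true.mp this) i hi
        exact (hInv.2.2.2 i).mp ((PySem.Set.contains_iff hav i).mp hc)
      have hMk : Mk rm.get? S p.1 :=
        Mk_rule rm.get? S (hp p List.mem_cons_self) (fun i hi => (hall i hi).imp id (hInv.2.1 i))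
      have hInv' : BInv rm S (PySem.Set.add made p.1) (PySem.Set.add hav p.1) := by
        refine ⟨PySem.Set.nodup_add _ _ hInv.1, ?_, ?_, ?_⟩
        · intro x hx
          rcases (PySem.Set.mem_add _ _ _).mp hx with hx | rfl
          · exact hInv.2.1 x hx
          · exact hMk
        · intro x hx
          rcases (PySem.Set.mem_add _ _ _).mp hx with hx | rfl
          · exact hInv.2.2.1 x hx
          · exact mem_keys_of_get?_some rm (hp p List.mem_cons_self)
        · intro x
          rw [PySem.Set.mem_add _ _ x, PySem.Set.mem_add _ _ x, hInv.2.2.2 x]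
          tauto
      have hlen : (PySem.Set.add made p.1).length = made.length + 1 := by
        rw [PySem.Set.add_of_not_mem hnm, List.length_append, List.length_cons, List.length_nil]
      obtain ⟨C1, C2, C3, C4, C5⟩ := ih (PySem.Set.add made p.1) (PySem.Set.add hav p.1) true
        (fun q hq => hp q (List.mem_cons_of_mem _ hq)) hInv'
      refine ⟨C1, by omega, fun _ => C3 rfl, ?_, ?_⟩
      · intro hflag
        rw [C3 rfl] at hflag; cases hflag
      · intro _ _; omega
    · rw [if_neg hfire]
      obtain ⟨C1, C2, C3, C4, C5⟩ := ih made hav c (fun q hq => hp q (List.mem_cons_of_mem _ hq)) hInv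
      refine ⟨C1, C2, C3, ?_, C5⟩
      intro hflag
      obtain ⟨heq, hrest⟩ := C4 hflag
      refine ⟨heq, ?_⟩
      intro q hq
      rcases List.mem_cons.mp hq with rfl | hq
      · -- q = p : the guard failed
        by_cases hc : PySem.Set.contains made q.1 = true
        · exact Or.inl ((PySem.Set.contains_iff made q.1).mp hc)
        · right
          have hcf : PySem.Set.contains made q.1 = false := by simpa using hc
          have h2 : q.2.all (fun i => PySem.Set.contains hav i) = false := by
            cases hall : q.2.all (fun i => PySem.Set.contains hav i)
            · rfl
            · exfalso
              apply hfire
              simp only [Bool.and_eq_true, Bool.not_eq_true']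
              exact ⟨hcf, hall⟩
          obtain ⟨i, hi, hci⟩ := List.all_eq_false.mp h2
          exact ⟨i, hi, fun hmem => by rw [(PySem.Set.contains_iff hav i).mpr hmem] at hci; simp at hci⟩
      · exact hrest q hq

theorem loopB_ok (rm : PySem.Dict String (List String)) (S : List String) (hnd : rm.keys.Nodup) :
    ∀ (fuel : Nat) (made hav : PySem.Set String),
    BInv rm S made hav → rm.keys.length ≤ fuel + made.length →
    BInv rm S (loopB rm fuel (made, hav)).1 (loopB rm fuel (made, hav)).2 ∧
      (∀ p ∈ rm.items, p.1 ∈ (loopB rm fuel (made, hav)).1 ∨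
        ∃ i ∈ p.2, i ∉ (loopB rm fuel (made, hav)).2) := by
  intro fuel
  induction fuel with
  | zero =>
    intro made hav hInv hlen
    refine ⟨hInv, ?_⟩
    intro p hp
    left
    have hsub : rm.keys ⊆ made :=
      nodup_subset_rev made rm.keys hInv.1 hnd hInv.2.2.1 (by simpa using hlen)
    exact hsub (PySem.Dict.mem_keys_of_mem_items rm hp)
  | succ fuel ih =>
    intro made hav hInv hlen
    have hitems : ∀ p ∈ rm.items, rm.get? p.1 = some p.2 := by
      intro p hp
      exact PySem.Dict.get?_of_mem_items rm (by exact hp) hnd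
    obtain ⟨C1, C2, C3, C4, C5⟩ := passFold_ok rm S rm.items made hav false hitems hInv
    show BInv rm S (loopB rm (fuel+1) (made, hav)).1 (loopB rm (fuel+1) (made, hav)).2 ∧ _
    rw [loopB]
    rcases hout : passB rm ((made, hav).1, (made, hav).2, false) with ⟨made', hav', flag⟩
    have hout' : rm.items.foldl (fun st p =>
        if !(PySem.Set.contains st.1 p.1) && p.2.all (fun i => PySem.Set.contains st.2.1 i) then
          (PySem.Set.add st.1 p.1, PySem.Set.add st.2.1 p.1, true)
        else st) (made, hav, false) = (made', hav', flag) := hout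
    rw [hout'] at C1 C2 C3 C4 C5
    cases flag with
    | true =>
      simp only
      have hgrow : made.length < made'.length := C5 rfl rfl
      exact ih made' hav' C1 (by omega)
    | false =>
      simp only
      obtain ⟨heq, hfix⟩ := C4 rfl
      have hm : made' = made := congrArg Prod.fst heq
      have hh : hav' = hav := congrArg (fun s => s.2.1) heq
      subst hm; subst hh
      refine ⟨hInv, ?_⟩
      intro p hp
      exact (hfix p hp).imp id id

theorem mk_in_made (rm : PySem.Dict String (List String)) (S : List String)
    (made hav : PySem.Set String) (hInv : BInv rm S made hav)
    (hFix : ∀ p ∈ rm.items, p.1 ∈ made ∨ ∃ i ∈ p.2, i ∉ hav) :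
    ∀ (k : Nat) (r : String), MkAt rm.get? S k r → r ∈ made := by
  intro k
  induction k with
  | zero => intro r h; simp [MkAt] at h
  | succ k ih =>
    rintro r ⟨l, hg, hall⟩
    rcases hFix (r, l) (PySem.Dict.mem_items_of_get?_eq_some rm hg) with h | ⟨i, hi, hnhav⟩
    · exact h
    · exfalso
      rcases hall i hi with hS | hMk
      · exact hnhav ((hInv.2.2.2 i).mpr (Or.inl hS))
      · exact hnhav ((hInv.2.2.2 i).mpr (Or.inr (ih i hMk)))

theorem keys_ofList_len {ν : Type} (ps : List (String × ν)) :
    (PySem.Dict.ofList ps).keys.length ≤ ps.length := by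
  show ((PySem.Dict.empty : PySem.Dict String ν).update ps).keys.length ≤ ps.length
  unfold PySem.Dict.update
  rw [PySem.Dict.keys_foldl_insert_key ps Prod.fst (fun _ x => x.2) PySem.Dict.empty]
  rw [PySem.Dict.keys_empty]
  show (PySem.Set.update [] (ps.map Prod.fst)).length ≤ ps.length
  have : PySem.Set.update [] (ps.map Prod.fst) = PySem.Set.ofList (ps.map Prod.fst) := rfl
  rw [this]
  calc (PySem.Set.ofList (ps.map Prod.fst)).length ≤ (ps.map Prod.fst).length :=
        PySem.Set.length_ofList_le _
    _ = ps.length := List.length_map _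

theorem B_char (recipes : List String) (ingredients : List (List String)) (supplies : List String) :
    ∀ x, x ∈ (loopB (PySem.Dict.ofList (recipes.zip ingredients)) recipes.length
        (PySem.Set.empty, PySem.Set.ofList supplies)).1
      ↔ Mk (PySem.Dict.ofList (recipes.zip ingredients)).get? supplies x := by
  intro x
  set rm := PySem.Dict.ofList (recipes.zip ingredients) with hrm
  have hnd : rm.keys.Nodup := PySem.Dict.nodup_keys_ofList _
  have hInv0 : BInv rm supplies PySem.Set.empty (PySem.Set.ofList supplies) := by
    refine ⟨List.nodup_nil, by simp [PySem.Set.empty], by simp [PySem.Set.empty], ?_⟩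
    intro y
    rw [PySem.Set.mem_ofList]
    simp [PySem.Set.empty]
  have hb : rm.keys.length ≤ recipes.length + (PySem.Set.empty : PySem.Set String).length := by
    have h1 : rm.keys.length ≤ (recipes.zip ingredients).length := keys_ofList_len _
    have h2 : (recipes.zip ingredients).length ≤ recipes.length := by
      rw [List.length_zip]; omega
    simp [PySem.Set.empty]
    omega
  obtain ⟨hInv, hFix⟩ := loopB_ok rm supplies hnd recipes.length PySem.Set.empty
    (PySem.Set.ofList supplies) hInv0 hb
  constructor
  · exact fun h => hInv.2.1 x h
  · rintro ⟨k, hk⟩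
    exact mk_in_made rm supplies _ _ hInv hFix k x hk

def GoodMemo (rm : PySem.Dict String (List String)) (S : List String) (P : List String)
    (memo : PySem.Dict String Bool) : Prop :=
  (∀ x, memo.get? x = some true → Mk rm.get? S x) ∧
  (∀ x, memo.get? x = some false → ¬ Mk rm.get? S x ∨ x ∈ P) ∧
  (∀ p ∈ P, memo.get? p = some false)

def GoodSup (S : List String) (memo : PySem.Dict String Bool) (sup : PySem.Set String) : Prop :=
  ∀ x, x ∈ sup ↔ x ∈ S ∨ memo.get? x = some true

def MemoKeys (rm : PySem.Dict String (List String)) (memo : PySem.Dict String Bool) : Prop :=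
  ∀ x b, memo.get? x = some b → x ∈ rm.keys

def Chain (g : String → Option (List String)) (S : List String) (P : List String) (r : String) : Prop :=
  ∀ a ∈ P, ∀ k, MkAt g S k a → ∃ j, j < k ∧ MkAt g S j r

def PostD (rm : PySem.Dict String (List String)) (S : List String) (P : List String) (r : String)
    (memo0 : PySem.Dict String Bool) (out : Bool × PySem.Dict String Bool × PySem.Set String) : Prop :=
  GoodMemo rm S P out.2.1 ∧ GoodSup S out.2.1 out.2.2 ∧ MemoKeys rm out.2.1 ∧
  (∀ x, out.2.1.get? x = none → memo0.get? x = none) ∧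
  (out.1 = true → Mk rm.get? S r ∧ out.2.1.get? r = some true) ∧
  (out.1 = false → ¬ Mk rm.get? S r ∨ r ∈ P)

def DfsOK (rm : PySem.Dict String (List String)) (S : List String) (fuel : Nat) : Prop :=
  ∀ r P memo sup, GoodMemo rm S P memo → GoodSup S memo sup → MemoKeys rm memo →
    Chain rm.get? S P r → pvMissing rm memo < fuel →
    PostD rm S P r memo (dfsA rm fuel r memo sup)

theorem go_ok (rm : PySem.Dict String (List String)) (S : List String) (fuel : Nat)
    (IH : DfsOK rm S fuel) :
    ∀ (l done : List String) (r : String) (P : List String) (memo : PySem.Dict String Bool)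
      (sup : PySem.Set String),
    GoodMemo rm S (P ++ [r]) memo → GoodSup S memo sup → MemoKeys rm memo →
    Chain rm.get? S P r → r ∉ P →
    rm.get? r = some (done ++ l) → (∀ i ∈ done, i ∈ S ∨ Mk rm.get? S i) →
    pvMissing rm memo < fuel →
    GoodMemo rm S P (goA rm fuel r l memo sup).2.1 ∧
    GoodSup S (goA rm fuel r l memo sup).2.1 (goA rm fuel r l memo sup).2.2 ∧
    MemoKeys rm (goA rm fuel r l memo sup).2.1 ∧
    (∀ x, (goA rm fuel r l memo sup).2.1.get? x = none → memo.get? x = none) ∧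
    ((goA rm fuel r l memo sup).1 = true →
      Mk rm.get? S r ∧ (goA rm fuel r l memo sup).2.1.get? r = some true) ∧
    ((goA rm fuel r l memo sup).1 = false → ¬ Mk rm.get? S r) := by
  intro l
  induction l with
  | nil =>
    intro done r P memo sup GM GS MK CH hrP hr hdone hfuel
    have hMk : Mk rm.get? S r :=
      Mk_rule rm.get? S (by simpa using hr) (fun i hi => hdone i hi)
    rw [goA]
    refine ⟨⟨?_, ?_, ?_⟩, ?_, ?_, ?_, ?_, ?_⟩
    · -- true entries
      intro x hx
      by_cases hxr : x = r
      · exact hxr ▸ hMk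
      · exact GM.1 x (by rwa [PySem.Dict.get?_insert_of_ne _ _ hxr] at hx)
    · -- false entries
      intro x hx
      by_cases hxr : x = r
      · subst hxr; rw [PySem.Dict.get?_insert_self] at hx; cases hx
      · rcases GM.2.1 x (by rwa [PySem.Dict.get?_insert_of_ne _ _ hxr] at hx) with h | h
        · exact Or.inl h
        · rcases List.mem_append.mp h with h | h
          · exact Or.inr h
          · exact absurd (List.mem_singleton.mp h) hxr
    · -- pending entries
      intro p hp
      have hpr : p ≠ r := fun h => hrP (h ▸ hp)
      rw [PySem.Dict.get?_insert_of_ne _ _ hpr]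
      exact GM.2.2 p (List.mem_append.mpr (Or.inl hp))
    · -- GoodSup
      intro x
      rw [PySem.Set.mem_add _ _ x]
      by_cases hxr : x = r
      · subst hxr
        rw [PySem.Dict.get?_insert_self]
        simp
      · rw [PySem.Dict.get?_insert_of_ne _ _ hxr, GS x]
        simp [hxr]
    · -- MemoKeys
      intro x b hx
      by_cases hxr : x = r
      · exact hxr ▸ mem_keys_of_get?_some rm hr
      · exact MK x b (by rwa [PySem.Dict.get?_insert_of_ne _ _ hxr] at hx)
    · -- none-mono
      intro x hx
      by_cases hxr : x = r
      · subst hxr; rw [PySem.Dict.get?_insert_self] at hx; cases hx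
      · rwa [PySem.Dict.get?_insert_of_ne _ _ hxr] at hx
    · intro _
      exact ⟨hMk, PySem.Dict.get?_insert_self _ _ _⟩
    · intro h; cases h
  | cons i rest ih =>
    intro done r P memo sup GM GS MK CH hrP hr hdone hfuel
    rw [goA]
    by_cases hsup : PySem.Set.contains sup i = true
    · -- i already available: skip
      rw [if_pos hsup]
      have hiS : i ∈ S ∨ Mk rm.get? S i := by
        rcases (GS i).mp ((PySem.Set.contains_iff sup i).mp hsup) with h | h
        · exact Or.inl h
        · exact Or.inr (GM.1 i h)
      exact ih (done ++ [i]) r P memo sup GM GS MK CH hrP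
        (by simpa using hr)
        (fun x hx => by
          rcases List.mem_append.mp hx with hx | hx
          · exact hdone x hx
          · exact (List.mem_singleton.mp hx) ▸ hiS)
        hfuel
    · -- recurse into dfs
      rw [if_neg hsup]
      have hinsup : i ∉ sup := fun h => hsup ((PySem.Set.contains_iff sup i).mpr h)
      have hiS : i ∉ S := fun h => hinsup ((GS i).mpr (Or.inl h))
      have hstep : ∀ k, MkAt rm.get? S k r → ∃ j, j < k ∧ MkAt rm.get? S j i := by
        intro k hk
        match k, hk with
        | k+1, ⟨l0, hg0, hall⟩ =>
          have hl0 : l0 = done ++ i :: rest := by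
            have := hg0.symm.trans hr
            exact Option.some.inj this
          subst hl0
          rcases hall i (by simp) with h | h
          · exact absurd h hiS
          · exact ⟨k, Nat.lt_succ_self k, h⟩
      have chain' : Chain rm.get? S (P ++ [r]) i := by
        intro a ha k hk
        rcases List.mem_append.mp ha with haP | har
        · obtain ⟨j, hj, hjr⟩ := CH a haP k hk
          obtain ⟨j', hj', hij⟩ := hstep j hjr
          exact ⟨j', by omega, hij⟩
        · rw [List.mem_singleton.mp har] at hk
          exact hstep k hk
      have postD := IH i (P ++ [r]) memo sup GM GS MK chain' hfuel
      rcases hdfs : dfsA rm fuel i memo sup with ⟨b, memo', sup'⟩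
      rw [hdfs] at postD
      obtain ⟨GM', GS', MK', NM', HT', HF'⟩ := postD
      cases b with
      | true =>
        simp only
        obtain ⟨hMki, _⟩ := HT' rfl
        have hfuel' : pvMissing rm memo' < fuel := lt_of_le_of_lt (pvMissing_mono rm NM') hfuel
        have hres := ih (done ++ [i]) r P memo' sup' GM' GS' MK' CH hrP
          (by simpa using hr)
          (fun x hx => by
            rcases List.mem_append.mp hx with hx | hx
            · exact hdone x hx
            · exact (List.mem_singleton.mp hx) ▸ Or.inr hMki)
          hfuel'
        exact ⟨hres.1, hres.2.1, hres.2.2.1, fun x hx => NM' x (hres.2.2.2.1 x hx),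
          hres.2.2.2.2.1, hres.2.2.2.2.2⟩
      | false =>
        simp only
        have hnMk : ¬ Mk rm.get? S r := by
          intro hMk
          have hMki : Mk rm.get? S i := by
            obtain ⟨k, hk⟩ := hMk
            obtain ⟨j, _, hj⟩ := hstep k hk
            exact ⟨j, hj⟩
          rcases HF' rfl with hnot | hmem
          · exact hnot hMki
          · rcases List.mem_append.mp hmem with hiP | hir
            · refine Mk_no_self rm.get? S ?_ hMki
              intro k hk
              obtain ⟨j, hj, hjr⟩ := CH i hiP k hk
              obtain ⟨j', hj', hij⟩ := hstep j hjr
              exact ⟨j', by omega, hij⟩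
            · have hir' : i = r := List.mem_singleton.mp hir
              subst hir'
              exact Mk_no_self rm.get? S hstep hMk
        refine ⟨⟨GM'.1, ?_, ?_⟩, GS', MK', NM', ?_, fun _ => hnMk⟩
        · intro x hx
          rcases GM'.2.1 x hx with h | h
          · exact Or.inl h
          · rcases List.mem_append.mp h with h | h
            · exact Or.inr h
            · exact Or.inl ((List.mem_singleton.mp h) ▸ hnMk)
        · intro p hp
          exact GM'.2.2 p (List.mem_append.mpr (Or.inl hp))
        · intro h; cases h

theorem dfs_ok_succ (rm : PySem.Dict String (List String)) (S : List String)
    (hnd : rm.keys.Nodup) (fuel : Nat) (IH : DfsOK rm S fuel) : DfsOK rm S (fuel + 1) := by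
  intro r P memo sup GM GS MK CH hfuel
  rw [dfsA]
  cases hm : memo.get? r with
  | some b =>
    simp only
    cases b with
    | true =>
      exact ⟨GM, GS, MK, fun x hx => hx, fun _ => ⟨GM.1 r hm, hm⟩, fun h => by simp at h⟩
    | false =>
      exact ⟨GM, GS, MK, fun x hx => hx, fun h => by simp at h, fun _ => GM.2.1 r hm⟩
  | none =>
    cases hg : rm.get? r with
    | none =>
      simp only
      refine ⟨GM, GS, MK, fun x hx => hx, fun h => by simp at h, fun _ => Or.inl ?_⟩
      rintro ⟨k, hk⟩
      match k, hk with
      | k+1, ⟨l, hl, _⟩ => rw [hg] at hl; cases hl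
    | some l =>
      simp only
      have hrP : r ∉ P := fun hp => by have := GM.2.2 r hp; rw [hm] at this; cases this
      have hrk : r ∈ rm.keys := mem_keys_of_get?_some rm hg
      have GM1 : GoodMemo rm S (P ++ [r]) (memo.insert r false) := by
        refine ⟨?_, ?_, ?_⟩
        · intro x hx
          by_cases hxr : x = r
          · subst hxr; rw [PySem.Dict.get?_insert_self] at hx; cases hx
          · exact GM.1 x (by rwa [PySem.Dict.get?_insert_of_ne _ _ hxr] at hx)
        · intro x hx
          by_cases hxr : x = r
          · exact Or.inr (List.mem_append.mpr (Or.inr (hxr ▸ List.mem_singleton_self r)))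
          · exact (GM.2.1 x (by rwa [PySem.Dict.get?_insert_of_ne _ _ hxr] at hx)).imp id
              (fun h => List.mem_append.mpr (Or.inl h))
        · intro p hp
          rcases List.mem_append.mp hp with hp | hp
          · have hpr : p ≠ r := fun h => hrP (h ▸ hp)
            rw [PySem.Dict.get?_insert_of_ne _ _ hpr]
            exact GM.2.2 p hp
          · rw [List.mem_singleton.mp hp, PySem.Dict.get?_insert_self]
      have GS1 : GoodSup S (memo.insert r false) sup := by
        intro x
        by_cases hxr : x = r
        · subst hxr
          rw [PySem.Dict.get?_insert_self, GS x, hm]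
          simp
        · rw [PySem.Dict.get?_insert_of_ne _ _ hxr]
          exact GS x
      have MK1 : MemoKeys rm (memo.insert r false) := by
        intro x b hx
        by_cases hxr : x = r
        · exact hxr ▸ hrk
        · exact MK x b (by rwa [PySem.Dict.get?_insert_of_ne _ _ hxr] at hx)
      have hfuel1 : pvMissing rm (memo.insert r false) < fuel := by
        have := pvMissing_insert rm memo r false hnd hrk hm
        omega
      obtain ⟨R1, R2, R3, R4, R5, R6⟩ := go_ok rm S fuel IH l [] r P (memo.insert r false) sup
        GM1 GS1 MK1 CH hrP (by simpa using hg) (by simp) hfuel1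
      refine ⟨R1, R2, R3, ?_, R5, fun h => Or.inl (R6 h)⟩
      intro x hx
      have := R4 x hx
      by_cases hxr : x = r
      · subst hxr; rw [PySem.Dict.get?_insert_self] at this; cases this
      · rwa [PySem.Dict.get?_insert_of_ne _ _ hxr] at this

theorem dfs_ok (rm : PySem.Dict String (List String)) (S : List String) (hnd : rm.keys.Nodup) :
    ∀ fuel, DfsOK rm S fuel := by
  intro fuel
  induction fuel with
  | zero => intro r P memo sup _ _ _ _ hfuel; omega
  | succ fuel ih => exact dfs_ok_succ rm S hnd fuel ih


theorem foldA_ok (rm : PySem.Dict String (List String)) (S : List String) (hnd : rm.keys.Nodup)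
    (fuel : Nat) (hfuel : rm.keys.length < fuel)
    (madeF : List String) (hmadeF : ∀ x, x ∈ madeF ↔ Mk rm.get? S x) :
    ∀ (rs : List String) (acc : List String) (memo : PySem.Dict String Bool)
      (sup : PySem.Set String),
    GoodMemo rm S [] memo → GoodSup S memo sup → MemoKeys rm memo →
    (rs.foldl (fun (st : List String × PySem.Dict String Bool × PySem.Set String) r =>
        match dfsA rm fuel r st.2.1 st.2.2 with
        | (b, memo, sup) => (if b then st.1 ++ [r] else st.1, memo, sup))
      (acc, memo, sup)).1
    = acc ++ rs.filter (fun r => PySem.Set.contains madeF r) := by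
  intro rs
  induction rs with
  | nil => intro acc memo sup _ _ _; simp
  | cons r rs ih =>
    intro acc memo sup GM GS MK
    have hfm : pvMissing rm memo < fuel := lt_of_le_of_lt (pvMissing_le rm memo) hfuel
    have post := dfs_ok rm S hnd fuel r [] memo sup GM GS MK (by intro a ha; cases ha) hfm
    rcases hout : dfsA rm fuel r memo sup with ⟨b, memo', sup'⟩
    rw [hout] at post
    obtain ⟨GM', GS', MK', NM', HT, HF⟩ := post
    have hb : b = PySem.Set.contains madeF r := by
      cases b with
      | true =>
        have := (HT rfl).1
        exact ((PySem.Set.contains_iff madeF r).mpr ((hmadeF r).mpr this)).symm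
      | false =>
        rcases HF rfl with hn | hmem
        · cases hc : PySem.Set.contains madeF r
          · rfl
          · exact absurd ((hmadeF r).mp ((PySem.Set.contains_iff madeF r).mp hc)) hn
        · cases hmem
    simp only [List.foldl_cons, hout]
    rw [ih (if b then acc ++ [r] else acc) memo' sup' GM' GS' MK']
    rw [List.filter_cons, ← hb]
    cases b <;> simp

-- ===== VERDICT (by name: the statement is the Claim_ definition above) =====
theorem findAllRecipes_spec : Claim_equal_findAllRecipes := by
  unfold Claim_equal_findAllRecipes
  intro recipes ingredients supplies _ hpre
  unfold Pre_findAllRecipes at hpre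
  unfold Spec_findAllRecipes findAllRecipes findAllRecipes_alt
  rw [buildA_eq recipes ingredients hpre]
  have hnd : (PySem.Dict.ofList (recipes.zip ingredients)).keys.Nodup :=
    PySem.Dict.nodup_keys_ofList _
  have hkey : (PySem.Dict.ofList (recipes.zip ingredients)).keys.length < recipes.length + 1 := by
    have h1 := keys_ofList_len (recipes.zip ingredients)
    have h2 : (recipes.zip ingredients).length ≤ recipes.length := by
      rw [List.length_zip]; omega
    omega
  have GM0 : GoodMemo (PySem.Dict.ofList (recipes.zip ingredients)) supplies []
      (PySem.Dict.empty : PySem.Dict String Bool) := by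
    refine ⟨?_, ?_, ?_⟩
    · intro x hx; rw [PySem.Dict.get?_empty] at hx; cases hx
    · intro x hx; rw [PySem.Dict.get?_empty] at hx; cases hx
    · intro p hp; cases hp
  have GS0 : GoodSup supplies (PySem.Dict.empty : PySem.Dict String Bool)
      (PySem.Set.ofList supplies) := by
    intro x
    rw [PySem.Set.mem_ofList, PySem.Dict.get?_empty]
    simp
  have MK0 : MemoKeys (PySem.Dict.ofList (recipes.zip ingredients))
      (PySem.Dict.empty : PySem.Dict String Bool) := by
    intro x b hx; rw [PySem.Dict.get?_empty] at hx; cases hx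
  rw [foldA_ok (PySem.Dict.ofList (recipes.zip ingredients)) supplies hnd (recipes.length + 1)
    hkey _ (B_char recipes ingredients supplies) recipes [] _ _ GM0 GS0 MK0]
  simp
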